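-- pv_equiv track=rewrite | github.com/tuvasat/tuvagramm7 | main.py | line_to_words
-- ===== SOURCE A (Python) =====
-- PUNCTUATION_MARKS = ':^,«»]•.- \t[!_/)?№*\n;('
--
-- def line_to_words(line: str) -> list:
--     res = ''
--     for i in line:
--         if i not in PUNCTUATION_MARKS and not i.isdigit():
--             res += i
--         else:
--             res += ' '
--     res = res.split()
--     return res
-- ===== SOURCE B (Python) =====
-- PUNCTUATION_MARKS = ':^,«»]•.- \t[!_/)?№*\n;('
--
-- def line_to_words(line: str) -> list:
--     # One pass: flush the current word buffer at each delimiter; whitespace is a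
--     # delimiter too because A's final split() splits on it.
--     words = []
--     buf = []
--     for c in line:
--         if c in PUNCTUATION_MARKS or c.isdigit() or c.isspace():
--             if buf:
--                 words.append(''.join(buf))
--                 buf = []
--         else:
--             buf.append(c)
--     if buf:
--         words.append(''.join(buf))
--     return words
-- ===== Notes on version B (the rewrite author's own statement) =====
-- stated objective: alternative
-- what changed: B replaces A's translate-to-spaces-then-split() two-phase approach with a single pass that flushes a word buffer at each delimiter (punctuation mark, digit, or whitespace), never building the translated string.
import Mathlib
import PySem

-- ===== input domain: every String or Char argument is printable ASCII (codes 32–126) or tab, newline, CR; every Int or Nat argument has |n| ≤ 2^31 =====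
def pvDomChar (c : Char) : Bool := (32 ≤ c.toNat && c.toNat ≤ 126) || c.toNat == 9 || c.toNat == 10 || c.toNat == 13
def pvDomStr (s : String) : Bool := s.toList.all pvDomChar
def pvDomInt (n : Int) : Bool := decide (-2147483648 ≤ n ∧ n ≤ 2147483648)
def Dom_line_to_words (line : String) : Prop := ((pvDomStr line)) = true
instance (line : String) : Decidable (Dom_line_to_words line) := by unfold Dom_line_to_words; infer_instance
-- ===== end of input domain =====

-- B replaces A's translate-then-split with a single pass that flushes a word
-- buffer at each delimiter (marks, digits, whitespace): one traversal, no
-- intermediate translated string (objective: alternative decomposition).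


-- ===== PORT A =====
-- PUNCTUATION_MARKS; 'i in PUNCTUATION_MARKS' for a single char i is membership
def pvMarks : List Char := ":^,«»]•.- \t[!_/)?№*\n;(".toList

def line_to_words (line : String) : List String :=
  let res : List Char := line.toList.foldl
    (fun r i => if !pvMarks.contains i && !PySem.Chars.isdigit i then r ++ [i] else r ++ [' ']) []
  (PySem.Chars.split₀ res).map String.ofList

-- ===== PORT B =====
def pvDelim (c : Char) : Bool :=
  pvMarks.contains c || PySem.Chars.isdigit c || PySem.Chars.isspace c

def pvAltGo : List Char → List Char → List String → List String
  | [], buf, words => if buf.isEmpty then words else words ++ [String.ofList buf]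
  | c :: rest, buf, words =>
      if pvDelim c then
        pvAltGo rest [] (if buf.isEmpty then words else words ++ [String.ofList buf])
      else
        pvAltGo rest (buf ++ [c]) words

def line_to_words_alt (line : String) : List String :=
  pvAltGo line.toList [] []

-- ===== PRECONDITION & SPEC =====
def Spec_line_to_words (line : String) (out : List String) : Prop := out = line_to_words_alt line
instance (line : String) (out : List String) : Decidable (Spec_line_to_words line out) := by unfold Spec_line_to_words; infer_instance

-- ===== CLAIM (what is proved, stated in full; the proofs are below) =====
def Claim_equal_line_to_words : Prop := ∀ (line : String), Dom_line_to_words line → Spec_line_to_words line (line_to_words line)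

-- ===== LEMMAS AND PROOFS =====

-- A's translation, per character
def pvF (i : Char) : Char :=
  if !pvMarks.contains i && !PySem.Chars.isdigit i then i else ' '

lemma pv_foldl_map (l : List Char) (r : List Char) :
    l.foldl (fun r i => if !pvMarks.contains i && !PySem.Chars.isdigit i then r ++ [i] else r ++ [' ']) r
      = r ++ l.map pvF := by
  induction l generalizing r with
  | nil => simp
  | cons c l ih =>
    rw [List.foldl_cons, List.map_cons]
    by_cases h : (!pvMarks.contains c && !PySem.Chars.isdigit c) = true
    · rw [if_pos h, ih]
      have : pvF c = c := by unfold pvF; rw [if_pos h]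
      rw [this]; simp
    · rw [if_neg h, ih]
      have : pvF c = ' ' := by unfold pvF; rw [if_neg h]
      rw [this]; simp

lemma pv_isspace_f (c : Char) : PySem.Chars.isspace (pvF c) = pvDelim c := by
  unfold pvF pvDelim
  cases hm : pvMarks.contains c <;> cases hd : PySem.Chars.isdigit c <;> rfl

lemma pv_f_id (c : Char) (h : pvDelim c = false) : pvF c = c := by
  unfold pvDelim at h
  simp only [Bool.or_eq_false_iff] at h
  unfold pvF
  rw [h.1.1, h.1.2]
  rfl

lemma pv_go_alt (l : List Char) (cur : List Char) (acc : List (List Char)) :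
    (PySem.Chars.split₀.go (l.map pvF) cur acc).map String.ofList
      = pvAltGo l cur.reverse ((acc.reverse).map String.ofList) := by
  induction l generalizing cur acc with
  | nil =>
    simp only [List.map_nil, PySem.Chars.split₀.go, pvAltGo]
    by_cases h : cur.isEmpty = true
    · simp [List.isEmpty_iff.mp h]
    · have : cur.reverse.isEmpty = false := by
        simp_all [List.isEmpty_iff]
      simp [h, this]
  | cons c l ih =>
    simp only [List.map_cons, PySem.Chars.split₀.go, pvAltGo, pv_isspace_f]
    by_cases hd : pvDelim c = true
    · simp only [hd]
      by_cases hc : cur.isEmpty = true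
      · have : cur.reverse.isEmpty = true := by simp_all [List.isEmpty_iff]
        simpa [this, hc] using ih [] acc
      · have : cur.reverse.isEmpty = false := by simp_all [List.isEmpty_iff]
        simpa [this, hc] using ih [] (cur.reverse :: acc)
    · have hd' : pvDelim c = false := by simpa using hd
      rw [pv_f_id c hd']
      simpa [hd'] using ih (c :: cur) acc

-- ===== VERDICT (by name: the statement is the Claim_ definition above) =====
theorem line_to_words_spec : Claim_equal_line_to_words := by
  intro line _
  unfold Spec_line_to_words line_to_words line_to_words_alt PySem.Chars.split₀
  rw [pv_foldl_map, List.nil_append]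
  simpa using pv_go_alt line.toList [] []
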